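-- pv_equiv track=rewrite | github.com/jonasRower/SQL-Comparator | python_createQueries/ziskejDatoveTypySloupcu.py | detekujZdaCelySloupecJeStejnehoDatovehoTypu
-- ===== SOURCE A (Python) =====
-- def detekujZdaCelySloupecJeStejnehoDatovehoTypu(datoveTypySloupce):
--
--     typExp = datoveTypySloupce[0]
--     polozkyJsouStejne = True
--
--     for i in range(1, len(datoveTypySloupce)):
--         typ = datoveTypySloupce[i]
--         if (typ != typExp):
--             polozkyJsouStejne = False
--             break
--
--     return (polozkyJsouStejne)
-- ===== SOURCE B (Python) =====
-- def detekujZdaCelySloupecJeStejnehoDatovehoTypu(datoveTypySloupce):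
--     return len(set(datoveTypySloupce)) <= 1
-- ===== Notes on version B (the rewrite author's own statement) =====
-- stated objective: idiomatic
-- what changed: Replaces the compare-to-first flag loop with a distinct-values set and a cardinality test; Pre_ excludes the empty list, on which A raises IndexError at datoveTypySloupce[0] (B returns True there).
import Mathlib
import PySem

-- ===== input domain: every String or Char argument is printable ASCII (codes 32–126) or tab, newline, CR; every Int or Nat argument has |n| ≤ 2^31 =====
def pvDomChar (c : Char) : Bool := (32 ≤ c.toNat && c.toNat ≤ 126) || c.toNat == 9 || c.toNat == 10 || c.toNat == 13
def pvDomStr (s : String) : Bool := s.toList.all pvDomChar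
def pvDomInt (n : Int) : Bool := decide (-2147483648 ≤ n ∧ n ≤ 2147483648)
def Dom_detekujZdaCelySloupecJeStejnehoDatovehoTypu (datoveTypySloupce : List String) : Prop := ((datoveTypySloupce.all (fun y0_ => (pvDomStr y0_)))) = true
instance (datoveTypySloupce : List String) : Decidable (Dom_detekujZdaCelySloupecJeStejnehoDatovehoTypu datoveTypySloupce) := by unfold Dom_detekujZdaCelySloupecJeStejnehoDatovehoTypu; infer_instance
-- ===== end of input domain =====

-- B replaces A's compare-to-first flag loop by building the set of distinct values and
-- testing its cardinality (idiomatic; same O(n) cost); B is total while A raises on [].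

-- ===== PORT A =====
-- A's for-loop over range(1, len) with the early break: structural recursion over the
-- tail, comparing each item to typExp and stopping at the first mismatch.
def detekujZdaCelySloupecJeStejnehoDatovehoTypu.loop (typExp : String) : List String → Bool
  | [] => true
  | typ :: rest => if typ ≠ typExp then false else detekujZdaCelySloupecJeStejnehoDatovehoTypu.loop typExp rest

def detekujZdaCelySloupecJeStejnehoDatovehoTypu (datoveTypySloupce : List String) : Bool :=
  match datoveTypySloupce with
  | [] => false  -- unreachable: Python A raises IndexError here (outside Pre_)
  | typExp :: rest => detekujZdaCelySloupecJeStejnehoDatovehoTypu.loop typExp rest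

-- ===== PORT B =====
def detekujZdaCelySloupecJeStejnehoDatovehoTypu_alt (datoveTypySloupce : List String) : Bool :=
  decide (PySem.Set.len (PySem.Set.ofList datoveTypySloupce) ≤ 1)

-- ===== PRECONDITION & SPEC =====
-- Pre_ excludes only the empty list, on which Python A raises IndexError.
def Pre_detekujZdaCelySloupecJeStejnehoDatovehoTypu (datoveTypySloupce : List String) : Prop :=
  datoveTypySloupce ≠ []
instance (datoveTypySloupce : List String) : Decidable (Pre_detekujZdaCelySloupecJeStejnehoDatovehoTypu datoveTypySloupce) := by unfold Pre_detekujZdaCelySloupecJeStejnehoDatovehoTypu; infer_instance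
def pvWitness_detekujZdaCelySloupecJeStejnehoDatovehoTypu : List String := ["int", "int"]

def Spec_detekujZdaCelySloupecJeStejnehoDatovehoTypu (datoveTypySloupce : List String) (out : Bool) : Prop := out = detekujZdaCelySloupecJeStejnehoDatovehoTypu_alt datoveTypySloupce
instance (datoveTypySloupce : List String) (out : Bool) : Decidable (Spec_detekujZdaCelySloupecJeStejnehoDatovehoTypu datoveTypySloupce out) := by unfold Spec_detekujZdaCelySloupecJeStejnehoDatovehoTypu; infer_instance

-- ===== CLAIM (what is proved, stated in full; the proofs are below) =====
def Claim_equal_detekujZdaCelySloupecJeStejnehoDatovehoTypu : Prop := ∀ (datoveTypySloupce : List String), Dom_detekujZdaCelySloupecJeStejnehoDatovehoTypu datoveTypySloupce → Pre_detekujZdaCelySloupecJeStejnehoDatovehoTypu datoveTypySloupce → Spec_detekujZdaCelySloupecJeStejnehoDatovehoTypu datoveTypySloupce (detekujZdaCelySloupecJeStejnehoDatovehoTypu datoveTypySloupce)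

-- ===== LEMMAS AND PROOFS =====

-- A's loop returns true iff every element of the tail equals typExp.
theorem loopA_eq_all (x : String) (l : List String) :
    detekujZdaCelySloupecJeStejnehoDatovehoTypu.loop x l = l.all (· == x) := by
  induction l with
  | nil => rfl
  | cons y ys ih =>
    simp only [detekujZdaCelySloupecJeStejnehoDatovehoTypu.loop, List.all_cons]
    by_cases h : y = x
    · simp [h, ih]
    · simp [h]

-- Folding Set.add never shrinks the accumulator.
theorem length_le_foldl_add (l : List String) (s : List String) :
    s.length ≤ (l.foldl PySem.Set.add s).length := by
  induction l generalizing s with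
  | nil => exact le_refl _
  | cons y ys ih =>
    refine le_trans ?_ (ih (PySem.Set.add s y))
    simp only [PySem.Set.add]
    split
    · exact le_refl _
    · simp

-- Folding into the singleton {x}: length stays ≤ 1 iff all elements are x.
theorem foldl_add_singleton (x : String) (l : List String) :
    ((l.foldl PySem.Set.add [x]).length ≤ 1) ↔ (∀ y ∈ l, y = x) := by
  induction l with
  | nil => simp
  | cons y ys ih =>
    by_cases h : y = x
    · subst h
      have : PySem.Set.add [y] y = [y] := by simp [PySem.Set.add, PySem.Set.contains]
      simp only [List.foldl_cons, this, ih]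
      constructor
      · intro hall z hz
        rcases List.mem_cons.mp hz with rfl | hz2
        · rfl
        · exact hall z hz2
      · intro hall z hz; exact hall z (List.mem_cons_of_mem _ hz)
    · have hadd : PySem.Set.add [x] y = [x, y] := by
        simp [PySem.Set.add, PySem.Set.contains, h]
      simp only [List.foldl_cons, hadd]
      constructor
      · intro hle
        have := length_le_foldl_add ys [x, y]
        simp at this; omega
      · intro hall
        exact absurd (hall y (List.mem_cons_self)) h

theorem ports_agree (x : String) (rest : List String) :
    detekujZdaCelySloupecJeStejnehoDatovehoTypu (x :: rest)
      = detekujZdaCelySloupecJeStejnehoDatovehoTypu_alt (x :: rest) := by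
  simp only [detekujZdaCelySloupecJeStejnehoDatovehoTypu,
    detekujZdaCelySloupecJeStejnehoDatovehoTypu_alt, loopA_eq_all,
    PySem.Set.len, PySem.Set.ofList_eq_foldl]
  have hfirst : PySem.Set.add ([] : List String) x = [x] := by
    simp [PySem.Set.add, PySem.Set.contains]
  simp only [List.foldl_cons, hfirst]
  by_cases hall : ∀ y ∈ rest, y = x
  · have hb : rest.all (· == x) = true := by
      simp only [List.all_eq_true, beq_iff_eq]; exact hall
    rw [hb]
    simp [(foldl_add_singleton x rest).mpr hall]
  · have hb : rest.all (· == x) = false := by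
      rw [Bool.eq_false_iff]
      intro hc
      exact hall (by simpa [List.all_eq_true] using hc)
    rw [hb]
    simp [(foldl_add_singleton x rest).not.mpr hall]

-- ===== VERDICT (by name: the statement is the Claim_ definition above) =====
theorem detekujZdaCelySloupecJeStejnehoDatovehoTypu_spec : Claim_equal_detekujZdaCelySloupecJeStejnehoDatovehoTypu := by
  intro xs _ hpre
  match xs with
  | [] => exact absurd rfl hpre
  | x :: rest =>
    unfold Spec_detekujZdaCelySloupecJeStejnehoDatovehoTypu
    exact ports_agree x rest
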